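-- pv_equiv track=rewrite | github.com/liuilin610/Leetcode-everyday | 1577. Number of Ways Where Square of Number Is Equal to Product of Two Numbers.py | tripletnum
-- ===== SOURCE A (Python) =====
-- from typing import List
--
-- def tripletnum(nums1: List[int], nums2: List[int]) -> int:
--     n1, n2 = len(nums1), len(nums2)
--     res = 0
--     dic1 = {}
--     dic2 = {}
--     for i in range(n1):
--         for k in range(i + 1, n1):
--             dic1[ nums1[i]* nums1[k]] = dic1.get(nums1[i] * nums1[k], 0) +1
--     for j in range(n2):
--         for k in range(j + 1, n2):
--             dic2[nums2[j] * nums2[k]] = dic2.get(nums2[j] * nums2[k], 0) + 1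
--     for i in range(n1):
--         if nums1[i] ** 2 in dic2:
--             res += dic2[ nums1[i] ** 2]
--     for j in range(n2):
--         if nums2[j] ** 2 in dic1:
--             res += dic1[ nums2[j] ** 2]
--     return res
--     '''
--     n1, n2 = len(nums1), len(nums2)
--     res = 0
--     dic1 = collections.Counter([i ** 2 for i in nums1])
--     dic2 = collections.Counter([j ** 2 for j in nums2])
--     for i in range(n1):
--         for k in range(i + 1, n1):
--             if (nums1[i] * nums1[k] in dic2):
--                 res += dic2[ nums1[i] * nums1[k]]
--     for j in range(n2):
--         for k in range(j + 1, n2):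
--             if (nums2[j] * nums2[k] in dic1):
--                 res += dic1[ nums1[j] * nums2[k]]
--     return res
--     '''
-- ===== SOURCE B (Python) =====
-- def _sqcount(xs):
--     d = {}
--     for x in xs:
--         d[x * x] = d.get(x * x, 0) + 1
--     return d
--
--
-- def _pairsum(ys, d):
--     res = 0
--     for j, y in enumerate(ys):
--         for z in ys[j + 1:]:
--             res += d.get(y * z, 0)
--     return res
--
--
-- def tripletnum(nums1, nums2):
--     return _pairsum(nums2, _sqcount(nums1)) + _pairsum(nums1, _sqcount(nums2))
-- ===== Notes on version B (the rewrite author's own statement) =====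
-- stated objective: alternative
-- what changed: B inverts the hashing direction: it builds a linear-size frequency dict of the SQUARES of each array and sums lookups while scanning the pairs of the other array, instead of A's quadratic-size dict of all pair products that is then probed with the squares.
import Mathlib
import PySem

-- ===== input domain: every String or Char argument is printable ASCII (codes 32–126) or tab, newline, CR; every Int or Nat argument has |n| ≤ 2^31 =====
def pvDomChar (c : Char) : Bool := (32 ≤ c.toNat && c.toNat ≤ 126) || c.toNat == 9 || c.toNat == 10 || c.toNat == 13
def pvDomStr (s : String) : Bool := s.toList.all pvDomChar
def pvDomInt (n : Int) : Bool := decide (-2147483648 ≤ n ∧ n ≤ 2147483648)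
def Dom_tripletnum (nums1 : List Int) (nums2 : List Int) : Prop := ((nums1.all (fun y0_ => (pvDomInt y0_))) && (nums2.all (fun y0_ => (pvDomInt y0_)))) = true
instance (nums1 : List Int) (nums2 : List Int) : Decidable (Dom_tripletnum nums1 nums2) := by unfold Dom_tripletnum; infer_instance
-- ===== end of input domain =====

-- B inverts A's hashing direction: it counts SQUARES in a linear-size dict and scans the pairs,
-- instead of counting all pair products in a quadratic-size dict and scanning the squares (objective: alternative).

-- ===== PORT A =====
def tripletnum (nums1 : List Int) (nums2 : List Int) : Int :=
  let n1 : Int := PySem.List.len nums1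
  let n2 : Int := PySem.List.len nums2
  let dic1 : PySem.Dict Int Int :=
    (PySem.List.pyRange 0 n1 1).foldl (fun d i =>
      (PySem.List.pyRange (i + 1) n1 1).foldl (fun d k =>
        d.insert (PySem.List.pyGetD nums1 i 0 * PySem.List.pyGetD nums1 k 0)
          (d.getD (PySem.List.pyGetD nums1 i 0 * PySem.List.pyGetD nums1 k 0) 0 + 1)) d)
      PySem.Dict.empty
  let dic2 : PySem.Dict Int Int :=
    (PySem.List.pyRange 0 n2 1).foldl (fun d j =>
      (PySem.List.pyRange (j + 1) n2 1).foldl (fun d k =>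
        d.insert (PySem.List.pyGetD nums2 j 0 * PySem.List.pyGetD nums2 k 0)
          (d.getD (PySem.List.pyGetD nums2 j 0 * PySem.List.pyGetD nums2 k 0) 0 + 1)) d)
      PySem.Dict.empty
  let res1 : Int :=
    (PySem.List.pyRange 0 n1 1).foldl (fun res i =>
      if dic2.contains (PySem.List.pyGetD nums1 i 0 ^ 2) then
        res + dic2.getD (PySem.List.pyGetD nums1 i 0 ^ 2) 0
      else res) 0
  let res2 : Int :=
    (PySem.List.pyRange 0 n2 1).foldl (fun res j =>
      if dic1.contains (PySem.List.pyGetD nums2 j 0 ^ 2) then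
        res + dic1.getD (PySem.List.pyGetD nums2 j 0 ^ 2) 0
      else res) res1
  res2

-- ===== PORT B =====
def sqcountB (xs : List Int) : PySem.Dict Int Int :=
  xs.foldl (fun d x => d.insert (x * x) (d.getD (x * x) 0 + 1)) PySem.Dict.empty

def pairsumB (ys : List Int) (d : PySem.Dict Int Int) : Int :=
  (PySem.List.enumerate ys).foldl (fun res p =>
    (PySem.List.slice ys (some (p.1 + 1)) none).foldl
      (fun res z => res + d.getD (p.2 * z) 0) res) 0

def tripletnum_alt (nums1 : List Int) (nums2 : List Int) : Int :=
  pairsumB nums2 (sqcountB nums1) + pairsumB nums1 (sqcountB nums2)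

-- ===== PRECONDITION & SPEC =====
def Spec_tripletnum (nums1 : List Int) (nums2 : List Int) (out : Int) : Prop := out = tripletnum_alt nums1 nums2
instance (nums1 : List Int) (nums2 : List Int) (out : Int) : Decidable (Spec_tripletnum nums1 nums2 out) := by unfold Spec_tripletnum; infer_instance

-- ===== CLAIM (what is proved, stated in full; the proofs are below) =====
def Claim_equal_tripletnum : Prop := ∀ (nums1 : List Int) (nums2 : List Int), Dom_tripletnum nums1 nums2 → Spec_tripletnum nums1 nums2 (tripletnum nums1 nums2)

-- ===== LEMMAS AND PROOFS =====

/-- The list of all products ys[i]*ys[k] for i < k, in A's loop order (proof-only). -/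
def pairProds (ys : List Int) : List Int :=
  (PySem.List.pyRange 0 (PySem.List.len ys) 1).flatMap
    (fun i => (ys.drop (i.toNat + 1)).map (fun z => PySem.List.pyGetD ys i 0 * z))

lemma getD_range_drop (ys : List Int) (a : Nat) :
    (List.range (ys.length - a)).map (fun k => ys.getD (a + k) 0) = ys.drop a := by
  apply List.ext_getElem
  · simp
  · intro k h1 h2
    have hk : a + k < ys.length := by
      simp only [List.length_map, List.length_range] at h1; omega
    simp only [List.getElem_map, List.getElem_range, List.getElem_drop]
    rw [List.getD_eq_getElem _ _ hk]

lemma dropMap (ys : List Int) (i : Int) (hi : 0 ≤ i) :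
    (PySem.List.pyRange (i + 1) (PySem.List.len ys) 1).map (fun k => PySem.List.pyGetD ys k 0)
      = ys.drop (i.toNat + 1) := by
  rw [PySem.List.pyRange_one, List.map_map]
  have hlen : PySem.List.len ys = (ys.length : Int) := rfl
  have h1 : (PySem.List.len ys - (i + 1)).toNat = ys.length - (i.toNat + 1) := by
    rw [hlen]; omega
  rw [h1, ← getD_range_drop ys (i.toNat + 1)]
  apply List.map_congr_left
  intro k hk
  simp only [Function.comp_apply]
  have h2 : i + 1 + (k : Int) = ((i.toNat + 1 + k : Nat) : Int) := by omega
  rw [h2, PySem.List.pyGetD_natCast]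

lemma countMap (l : List Int) (f : Int → Int) (p : Int) :
    (l.map f).count p = l.countP (fun a => f a == p) := by
  induction l with
  | nil => simp
  | cons x t ih =>
    rw [List.map_cons, List.count_cons, List.countP_cons, ih]

lemma exchange (xs : List Int) (L : List Int) :
    (L.map (fun p => ((xs.countP (fun x => x * x == p) : Nat) : Int))).sum
      = (xs.map (fun x => ((L.count (x * x) : Nat) : Int))).sum := by
  induction L with
  | nil => simp
  | cons p t ih =>
    have hsplit : (xs.map (fun x => (((p :: t).count (x * x) : Nat) : Int))).sum
        = (xs.map (fun x => ((t.count (x * x) : Nat) : Int)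
            + (if (x * x == p) = true then (1 : Int) else 0))).sum := by
      apply congrArg
      apply List.map_congr_left
      intro x _
      rw [List.count_cons]
      push_cast
      by_cases h : x * x = p
      · simp [h]
      · simp [beq_iff_eq, h, Ne.symm h]
    rw [hsplit, PySem.List.sum_map_add_int, PySem.List.sum_map_ite_one_zero,
        List.map_cons, List.sum_cons, ih]
    ring

lemma nested_counter (ys : List Int) :
    (PySem.List.pyRange 0 (PySem.List.len ys) 1).foldl (fun d i =>
      (PySem.List.pyRange (i + 1) (PySem.List.len ys) 1).foldl (fun d k =>
        d.insert (PySem.List.pyGetD ys i 0 * PySem.List.pyGetD ys k 0)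
          (d.getD (PySem.List.pyGetD ys i 0 * PySem.List.pyGetD ys k 0) 0 + 1)) d)
      PySem.Dict.empty = PySem.Dict.counter (pairProds ys) := by
  unfold pairProds
  rw [← PySem.Dict.foldl_insert_getD_add_one_eq_counter, List.flatMap_def,
      List.foldl_flatten, List.foldl_map]
  apply PySem.List.foldl_congr_mem
  intro d i hi
  have h0 : (0 : Int) ≤ i := (PySem.List.mem_pyRange_one.mp hi).1
  rw [← dropMap ys i h0, List.map_map, List.foldl_map]
  rfl

lemma res_loop (xs ys : List Int) (r : Int) :
    (PySem.List.pyRange 0 (PySem.List.len xs) 1).foldl (fun res i =>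
      if (PySem.Dict.counter (pairProds ys)).contains (PySem.List.pyGetD xs i 0 ^ 2) then
        res + (PySem.Dict.counter (pairProds ys)).getD (PySem.List.pyGetD xs i 0 ^ 2) 0
      else res) r
    = r + (xs.map (fun x => (((pairProds ys).count (x * x) : Nat) : Int))).sum := by
  trans ((PySem.List.pyRange 0 (PySem.List.len xs) 1).foldl (fun res i =>
      res + (((pairProds ys).count
        (PySem.List.pyGetD xs i 0 * PySem.List.pyGetD xs i 0) : Nat) : Int)) r)
  · apply PySem.List.foldl_congr_mem
    intro res i _
    simp only [PySem.Dict.contains_counter, PySem.Dict.getD_counter, pow_two]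
    by_cases h : (pairProds ys).contains
        (PySem.List.pyGetD xs i 0 * PySem.List.pyGetD xs i 0) = true
    · rw [if_pos h]
    · rw [if_neg h]
      have hz : (pairProds ys).count
          (PySem.List.pyGetD xs i 0 * PySem.List.pyGetD xs i 0) = 0 := by
        rw [List.count_eq_zero]
        intro hmem
        exact h (List.contains_iff_mem.mpr hmem)
      rw [hz]
      simp
  · rw [PySem.List.foldl_add]
    congr 1
    conv_rhs => rw [← PySem.List.map_pyGetD_pyRange_zero xs 0]
    rw [List.map_map]
    rfl

lemma A_eq (xs ys : List Int) :
    tripletnum xs ys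
      = (xs.map (fun x => (((pairProds ys).count (x * x) : Nat) : Int))).sum
        + (ys.map (fun y => (((pairProds xs).count (y * y) : Nat) : Int))).sum := by
  simp only [tripletnum]
  rw [nested_counter xs, nested_counter ys, res_loop ys xs, res_loop xs ys]
  ring

lemma B_eq (xs ys : List Int) :
    pairsumB ys (sqcountB xs)
      = ((pairProds ys).map (fun p => ((xs.countP (fun x => x * x == p) : Nat) : Int))).sum := by
  have hsq : sqcountB xs = PySem.Dict.counter (xs.map (fun x => x * x)) := by
    unfold sqcountB
    rw [← PySem.Dict.foldl_insert_getD_add_one_eq_counter, List.foldl_map]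
  unfold pairsumB pairProds
  rw [hsq, PySem.List.enumerate_eq_map_pyRange ys 0, List.foldl_map,
      List.flatMap_def, List.map_flatten, List.sum_flatten, List.map_map, List.map_map]
  trans ((PySem.List.pyRange 0 (PySem.List.len ys) 1).foldl (fun res j =>
      res + ((ys.drop (j.toNat + 1)).map (fun z =>
        ((xs.countP (fun x => x * x == PySem.List.pyGetD ys j 0 * z) : Nat) : Int))).sum) 0)
  · apply PySem.List.foldl_congr_mem
    intro res j hj
    have h0 : (0 : Int) ≤ j := (PySem.List.mem_pyRange_one.mp hj).1
    have h1 : (0 : Int) ≤ j + 1 := by omega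
    simp only
    rw [PySem.List.slice_from ys h1]
    have h2 : (j + 1).toNat = j.toNat + 1 := by omega
    rw [h2, PySem.List.foldl_add]
    congr 1
    apply congrArg
    apply List.map_congr_left
    intro z _
    rw [PySem.Dict.getD_counter, countMap]
  · rw [PySem.List.foldl_add]
    simp only [zero_add]
    apply congrArg
    apply List.map_congr_left
    intro i hi
    simp only [Function.comp_apply, List.map_map]
    rfl

-- ===== VERDICT (by name: the statement is the Claim_ definition above) =====
theorem tripletnum_spec : Claim_equal_tripletnum := by
  intro nums1 nums2 _
  unfold Spec_tripletnum tripletnum_alt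
  rw [A_eq, B_eq, B_eq, exchange, exchange]
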